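-- pv_equiv track=rewrite | github.com/rjaus2026-coder/mining_market_intelligence | report/advisory.py | _score_rationale
-- ===== SOURCE A (Python) =====
-- def _score_rationale(signal: dict) -> str:
--     parts = [
--         ("impact", int(signal.get("impact") or 0), "meaningful operational impact"),
--         ("time_to_strain", int(signal.get("time_to_strain") or 0), "a relatively near-term pain window"),
--         ("fit", int(signal.get("fit") or 0), "clear fit with FP360's operating lane"),
--         ("access", int(signal.get("access") or 0), "a plausible path to stakeholder access"),
--     ]
--     strongest = [phrase for _, _, phrase in sorted(parts, key=lambda item: item[1], reverse=True)[:2]]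
--     if not strongest:
--         return "Low-confidence signal; monitor for follow-on operating detail."
--     if len(strongest) == 1:
--         return f"The score is driven mainly by {strongest[0]}."
--     return f"The score is driven mainly by {strongest[0]} and {strongest[1]}."
-- ===== SOURCE B (Python) =====
-- def _score_rationale(sig: dict) -> str:
--     scores = [
--         (int(sig.get("impact") or 0), "meaningful operational impact"),
--         (int(sig.get("time_to_strain") or 0), "a relatively near-term pain window"),
--         (int(sig.get("fit") or 0), "clear fit with FP360's operating lane"),
--         (int(sig.get("access") or 0), "a plausible path to stakeholder access"),
--     ]
--     best, second = scores[0], scores[1]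
--     if second[0] > best[0]:
--         best, second = second, best
--     for cur in scores[2:]:
--         if cur[0] > best[0]:
--             best, second = cur, best
--         elif cur[0] > second[0]:
--             second = cur
--     return f"The score is driven mainly by {best[1]} and {second[1]}."
-- ===== Notes on version B (the rewrite author's own statement) =====
-- stated objective: alternative
-- what changed: Replaces the stable reverse insertion-sort of all four factors plus take-2/guard branches by a single linear pass that maintains the best and second-best entries with strict > updates (ties keep the earlier-declared factor), then formats the two retained phrases directly.
import Mathlib
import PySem

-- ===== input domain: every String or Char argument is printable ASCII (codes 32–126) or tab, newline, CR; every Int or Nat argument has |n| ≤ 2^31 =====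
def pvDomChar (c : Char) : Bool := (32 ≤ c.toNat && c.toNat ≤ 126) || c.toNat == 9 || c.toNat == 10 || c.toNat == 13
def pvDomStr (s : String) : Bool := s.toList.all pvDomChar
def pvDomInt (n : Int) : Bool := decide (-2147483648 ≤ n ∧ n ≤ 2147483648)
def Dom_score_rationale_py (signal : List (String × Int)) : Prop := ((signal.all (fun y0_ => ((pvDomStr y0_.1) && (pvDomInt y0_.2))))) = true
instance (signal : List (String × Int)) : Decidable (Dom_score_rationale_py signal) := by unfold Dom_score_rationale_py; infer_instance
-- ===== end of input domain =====

-- B replaces A's stable reverse sort + take-2 by one pass keeping the best two entries (strict > so ties keep the earlier factor); same output, similar cost.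

-- ===== PORT A =====
-- int(signal.get(k) or 0): missing key -> 0, value 0 -> 0, else the value (exact: values are ints)
def pyOrZero (v : Option Int) : Int :=
  match v with
  | none => 0
  | some n => if n = 0 then 0 else n

def score_rationale_py (signal : List (String × Int)) : String :=
  let d : PySem.Dict String Int := ⟨signal⟩
  let parts : List (String × Int × String) :=
    [("impact", pyOrZero (d.get? "impact"), "meaningful operational impact"),
     ("time_to_strain", pyOrZero (d.get? "time_to_strain"), "a relatively near-term pain window"),
     ("fit", pyOrZero (d.get? "fit"), "clear fit with FP360's operating lane"),
     ("access", pyOrZero (d.get? "access"), "a plausible path to stakeholder access")]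
  let strongest : List String :=
    ((PySem.List.sorted parts (fun item => item.2.1) true).take 2).map (fun t => t.2.2)
  match strongest with
  | [] => "Low-confidence signal; monitor for follow-on operating detail."
  | [p] => "The score is driven mainly by " ++ p ++ "."
  | p1 :: p2 :: _ => "The score is driven mainly by " ++ p1 ++ " and " ++ p2 ++ "."

-- ===== PORT B =====
def score_rationale_py_alt (signal : List (String × Int)) : String :=
  let d : PySem.Dict String Int := ⟨signal⟩
  let e0 : Int × String := (pyOrZero (d.get? "impact"), "meaningful operational impact")
  let e1 : Int × String := (pyOrZero (d.get? "time_to_strain"), "a relatively near-term pain window")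
  let e2 : Int × String := (pyOrZero (d.get? "fit"), "clear fit with FP360's operating lane")
  let e3 : Int × String := (pyOrZero (d.get? "access"), "a plausible path to stakeholder access")
  let init : (Int × String) × (Int × String) := if e1.1 > e0.1 then (e1, e0) else (e0, e1)
  let step : (Int × String) × (Int × String) → Int × String → (Int × String) × (Int × String) :=
    fun st cur =>
      if cur.1 > st.1.1 then (cur, st.1)
      else if cur.1 > st.2.1 then (st.1, cur)
      else st
  let fin := [e2, e3].foldl step init
  "The score is driven mainly by " ++ fin.1.2 ++ " and " ++ fin.2.2 ++ "."

-- ===== PRECONDITION & SPEC =====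
def Spec_score_rationale_py (signal : List (String × Int)) (out : String) : Prop := out = score_rationale_py_alt signal
instance (signal : List (String × Int)) (out : String) : Decidable (Spec_score_rationale_py signal out) := by unfold Spec_score_rationale_py; infer_instance

-- ===== CLAIM (what is proved, stated in full; the proofs are below) =====
def Claim_equal_score_rationale_py : Prop := ∀ (signal : List (String × Int)), Dom_score_rationale_py signal → Spec_score_rationale_py signal (score_rationale_py signal)

-- ===== LEMMAS AND PROOFS =====

-- core fact: for any four scores, A's sort-based selection and B's one-pass selection format the same string
set_option maxHeartbeats 1000000 in
theorem core_eq (a b c d : Int) (pa pb pc pd : String) :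
    (match ((PySem.List.sorted
        [("impact", a, pa), ("time_to_strain", b, pb), ("fit", c, pc), ("access", d, pd)]
        (fun item => item.2.1) true).take 2).map (fun t => t.2.2) with
      | [] => "Low-confidence signal; monitor for follow-on operating detail."
      | [p] => "The score is driven mainly by " ++ p ++ "."
      | p1 :: p2 :: _ => "The score is driven mainly by " ++ p1 ++ " and " ++ p2 ++ ".")
    = (let init := if b > a then ((b, pb), (a, pa)) else ((a, pa), (b, pb))
       let step : (Int × String) × (Int × String) → Int × String → (Int × String) × (Int × String) :=
         fun st cur =>
           if cur.1 > st.1.1 then (cur, st.1)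
           else if cur.1 > st.2.1 then (st.1, cur)
           else st
       let fin := [(c, pc), (d, pd)].foldl step init
       "The score is driven mainly by " ++ fin.1.2 ++ " and " ++ fin.2.2 ++ ".") := by
  simp only [PySem.List.sorted, PySem.List.insertBy, List.foldl]
  repeat' first
    | rfl
    | omega
    | (split_ifs <;> simp only [PySem.List.insertBy, List.take, List.map,
        decide_eq_true_eq, not_lt] at *)

-- ===== VERDICT (by name: the statement is the Claim_ definition above) =====
theorem score_rationale_py_spec : Claim_equal_score_rationale_py := by
  intro signal _
  unfold Spec_score_rationale_py score_rationale_py score_rationale_py_alt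
  exact core_eq _ _ _ _ _ _ _ _
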